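-- pv_equiv track=rewrite | github.com/ayajlassi987/resume_job-matching | src/chunking.py | manage_context_window
-- ===== SOURCE A (Python) =====
-- from typing import List
--
-- def manage_context_window(texts: List[str], max_tokens: int = 3000, chars_per_token: int = 4) -> List[str]:
--     """
--     Manage context window by truncating or prioritizing texts.
--
--     Args:
--         texts: List of texts to manage
--         max_tokens: Maximum tokens allowed
--         chars_per_token: Average characters per token
--
--     Returns:
--         List of texts that fit within context window
--     """
--     max_chars = max_tokens * chars_per_token
--     selected_texts = []
--     current_length = 0
--
--     for text in texts:
--         if current_length + len(text) <= max_chars: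
--             selected_texts.append(text)
--             current_length += len(text)
--         else:
--             # Truncate the last text to fit
--             remaining = max_chars - current_length
--             if remaining > 100:  # Only add if meaningful space remains
--                 selected_texts.append(text[:remaining] + "...")
--             break
--
--     return selected_texts
-- ===== SOURCE B (Python) =====
-- from typing import List
--
-- def manage_context_window(texts: List[str], max_tokens: int = 3000, chars_per_token: int = 4) -> List[str]:
--     """Index-first reformulation: build the cumulative-length table, locate the
--     cutoff index, then assemble the answer as a slice plus an optional truncated tail."""
--     max_chars = max_tokens * chars_per_token
--     cums = []
--     total = 0
--     for t in texts:
--         total += len(t)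
--         cums.append(total)
--     cutoff = 0
--     for c in cums:
--         if c > max_chars:
--             break
--         cutoff += 1
--     selected = texts[:cutoff]
--     if cutoff < len(texts):
--         remaining = max_chars - (cums[cutoff - 1] if cutoff > 0 else 0)
--         if remaining > 100:
--             selected.append(texts[cutoff][:remaining] + "...")
--     return selected
-- ===== Notes on version B (the rewrite author's own statement) =====
-- stated objective: alternative
-- what changed: Replaced the incremental accumulate-and-break selection loop by an index-first shape: build the cumulative-length table, scan it for the cutoff index, return texts[:cutoff] and assemble the optional truncated tail from the table.
import Mathlib
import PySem

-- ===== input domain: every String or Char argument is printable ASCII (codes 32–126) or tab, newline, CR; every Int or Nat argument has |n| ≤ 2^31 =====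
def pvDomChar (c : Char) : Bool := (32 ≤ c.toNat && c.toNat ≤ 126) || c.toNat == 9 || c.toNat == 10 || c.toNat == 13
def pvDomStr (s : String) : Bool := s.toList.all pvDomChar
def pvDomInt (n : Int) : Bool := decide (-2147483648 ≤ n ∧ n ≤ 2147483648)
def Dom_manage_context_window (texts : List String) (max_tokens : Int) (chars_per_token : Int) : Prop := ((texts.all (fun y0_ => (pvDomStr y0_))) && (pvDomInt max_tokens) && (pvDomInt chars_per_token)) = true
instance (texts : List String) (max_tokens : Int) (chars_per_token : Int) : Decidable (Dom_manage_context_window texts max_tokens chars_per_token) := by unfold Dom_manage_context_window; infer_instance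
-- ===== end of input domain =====

-- ===== PORT A =====
-- B changes only the decomposition (cumulative-length table + cutoff index instead of an
-- incremental accumulate-and-break loop); return values are proved equal on all inputs.

-- A's for-loop with break: state is (current_length); the selected list is the returned prefix.
def mcwGo (max_chars : Int) : List String → Int → List String
  | [], _ => []
  | t :: ts, cur =>
    if cur + PySem.Str.len t ≤ max_chars then
      t :: mcwGo max_chars ts (cur + PySem.Str.len t)
    else
      -- remaining = max_chars - current_length; text[:remaining] + "..."
      if max_chars - cur > 100 then
        [PySem.Str.slice t none (some (max_chars - cur)) ++ "..."]
      else []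

def manage_context_window (texts : List String) (max_tokens : Int) (chars_per_token : Int) : List String :=
  let max_chars := max_tokens * chars_per_token
  mcwGo max_chars texts 0

-- ===== PORT B =====
-- running-total loop building the cumulative-length table (Source B's first loop)
def mcwAccum (total : Int) : List Int → List Int
  | [] => []
  | x :: xs => (total + x) :: mcwAccum (total + x) xs

-- scan for the first cumulative length exceeding max_chars (Source B's second loop, with break)
def mcwCutoff (max_chars : Int) : List Int → Nat
  | [] => 0
  | c :: cs => if max_chars < c then 0 else mcwCutoff max_chars cs + 1

def manage_context_window_alt (texts : List String) (max_tokens : Int) (chars_per_token : Int) : List String :=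
  let max_chars := max_tokens * chars_per_token
  let cums := mcwAccum 0 (texts.map PySem.Str.len)
  let cutoff := mcwCutoff max_chars cums
  let selected := texts.take cutoff
  if cutoff < texts.length then
    -- cums[cutoff - 1] and texts[cutoff]: indices are in range here (cutoff < len texts = len cums),
    -- so Python's list indexing is exactly getD
    let before : Int := if cutoff = 0 then 0 else cums.getD (cutoff - 1) 0
    let remaining := max_chars - before
    if remaining > 100 then
      selected ++ [PySem.Str.slice (texts.getD cutoff "") none (some remaining) ++ "..."]
    else selected
  else selected

-- ===== PRECONDITION & SPEC =====
def Spec_manage_context_window (texts : List String) (max_tokens : Int) (chars_per_token : Int) (out : List String) : Prop := out = manage_context_window_alt texts max_tokens chars_per_token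
instance (texts : List String) (max_tokens : Int) (chars_per_token : Int) (out : List String) : Decidable (Spec_manage_context_window texts max_tokens chars_per_token out) := by unfold Spec_manage_context_window; infer_instance

-- ===== CLAIM (what is proved, stated in full; the proofs are below) =====
def Claim_equal_manage_context_window : Prop := ∀ (texts : List String) (max_tokens : Int) (chars_per_token : Int), Dom_manage_context_window texts max_tokens chars_per_token → Spec_manage_context_window texts max_tokens chars_per_token (manage_context_window texts max_tokens chars_per_token)

-- ===== LEMMAS AND PROOFS =====

-- ===== VERDICT (by name: the statement is the Claim_ definition above) =====
-- altCore b texts is manage_context_window_alt's body with max_chars = b (used to thread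
-- A's running current_length through B's budget).
def altCore (b : Int) (texts : List String) : List String :=
  let cums := mcwAccum 0 (texts.map PySem.Str.len)
  let cutoff := mcwCutoff b cums
  let selected := texts.take cutoff
  if cutoff < texts.length then
    let before : Int := if cutoff = 0 then 0 else cums.getD (cutoff - 1) 0
    let remaining := b - before
    if remaining > 100 then
      selected ++ [PySem.Str.slice (texts.getD cutoff "") none (some remaining) ++ "..."]
    else selected
  else selected

theorem alt_eq_altCore (texts : List String) (mt cpt : Int) :
    manage_context_window_alt texts mt cpt = altCore (mt * cpt) texts := rfl

theorem mcwAccum_shift (s a : Int) (xs : List Int) :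
    mcwAccum (s + a) xs = (mcwAccum a xs).map (s + ·) := by
  induction xs generalizing a with
  | nil => simp [mcwAccum]
  | cons x xs ih => simp [mcwAccum, add_assoc, ih (a + x)]

theorem mcwAccum_length (s : Int) (xs : List Int) :
    (mcwAccum s xs).length = xs.length := by
  induction xs generalizing s with
  | nil => rfl
  | cons x xs ih => simp [mcwAccum, ih]

theorem mcwCutoff_map_shift (b s : Int) (xs : List Int) :
    mcwCutoff b (xs.map (s + ·)) = mcwCutoff (b - s) xs := by
  induction xs with
  | nil => rfl
  | cons x xs ih =>
    by_cases hx : b < s + x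
    · simp [List.map_cons, mcwCutoff, hx, show b - s < x by omega]
    · simp [List.map_cons, mcwCutoff, hx, show ¬ b - s < x by omega, ih]

theorem mcwCutoff_le_length (b : Int) (xs : List Int) :
    mcwCutoff b xs ≤ xs.length := by
  induction xs with
  | nil => exact Nat.le_refl 0
  | cons x xs ih =>
    simp only [mcwCutoff, List.length_cons]
    split
    · exact Nat.zero_le _
    · exact Nat.succ_le_succ ih

theorem altCore_cons_over (b : Int) (t : String) (ts : List String)
    (h : b < PySem.Str.len t) :
    altCore b (t :: ts) =
      if b > 100 then [PySem.Str.slice t none (some b) ++ "..."] else [] := by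
  simp only [altCore, List.map_cons, mcwAccum, zero_add, mcwCutoff, if_pos h]
  simp

theorem altCore_cons_fit (b : Int) (t : String) (ts : List String)
    (h : PySem.Str.len t ≤ b) :
    altCore b (t :: ts) = t :: altCore (b - PySem.Str.len t) ts := by
  have hb : ¬ b < PySem.Str.len t := not_lt.mpr h
  simp only [altCore, List.map_cons, mcwAccum, zero_add]
  rw [show mcwAccum (PySem.Str.len t) (ts.map PySem.Str.len)
        = (mcwAccum 0 (ts.map PySem.Str.len)).map (PySem.Str.len t + ·) by
      simpa using mcwAccum_shift (PySem.Str.len t) 0 (ts.map PySem.Str.len)]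
  simp only [mcwCutoff, hb, if_false, mcwCutoff_map_shift]
  have hklen := mcwCutoff_le_length (b - PySem.Str.len t) (mcwAccum 0 (ts.map PySem.Str.len))
  rw [mcwAccum_length, List.length_map] at hklen
  have hlen : (mcwAccum 0 (ts.map PySem.Str.len)).length = ts.length := by
    rw [mcwAccum_length, List.length_map]
  generalize hGen : mcwCutoff (b - PySem.Str.len t) (mcwAccum 0 (ts.map PySem.Str.len)) = k at hklen ⊢
  by_cases hlt : k < ts.length
  · have hlt' : k + 1 < (t :: ts).length := by simp only [List.length_cons]; omega
    simp only [if_pos hlt, if_pos hlt', List.take_succ_cons, List.getD_cons_succ,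
      Nat.add_sub_cancel, Nat.succ_ne_zero, if_false]
    have hgd : (PySem.Str.len t :: (mcwAccum 0 (ts.map PySem.Str.len)).map (PySem.Str.len t + ·)).getD k 0
        = PySem.Str.len t + (if k = 0 then 0 else (mcwAccum 0 (ts.map PySem.Str.len)).getD (k - 1) 0) := by
      cases k with
      | zero => simp
      | succ j =>
        have hj : j < (mcwAccum 0 (ts.map PySem.Str.len)).length := by omega
        have hj' : j < ((mcwAccum 0 (ts.map PySem.Str.len)).map (PySem.Str.len t + ·)).length := by
          simpa using hj
        simp only [List.getD_cons_succ, Nat.succ_ne_zero, if_false, Nat.add_sub_cancel,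
          List.getD_eq_getElem _ _ hj', List.getD_eq_getElem _ _ hj, List.getElem_map]
    rw [hgd, show b - (PySem.Str.len t + (if k = 0 then 0 else (mcwAccum 0 (ts.map PySem.Str.len)).getD (k - 1) 0))
        = b - PySem.Str.len t - (if k = 0 then 0 else (mcwAccum 0 (ts.map PySem.Str.len)).getD (k - 1) 0) from by ring]
    split_ifs <;> rfl
  · have hnlt : ¬ (k + 1 < (t :: ts).length) := by simp only [List.length_cons]; omega
    rw [if_neg hnlt, if_neg hlt]
    simp

theorem mcwGo_eq_altCore (texts : List String) (m cur : Int) :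
    mcwGo m texts cur = altCore (m - cur) texts := by
  induction texts generalizing cur with
  | nil => rfl
  | cons t ts ih =>
    by_cases h : cur + PySem.Str.len t ≤ m
    · rw [mcwGo, if_pos h, ih (cur + PySem.Str.len t),
        altCore_cons_fit _ _ _ (by omega)]
      congr 1
      ring_nf
    · rw [mcwGo, if_neg h, altCore_cons_over _ _ _ (by omega)]

-- ===== VERDICT (by name: the statement is the Claim_ definition above) =====
theorem manage_context_window_spec : Claim_equal_manage_context_window := by
  intro texts mt cpt _
  unfold Spec_manage_context_window manage_context_window
  rw [alt_eq_altCore, mcwGo_eq_altCore]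
  simp
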